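-- pv_equiv track=rewrite | github.com/SamSiew/Miller-Rabin-LZSS_Algorithm | task2/decoder_lzss.py | decode_elias
-- ===== SOURCE A (Python) =====
-- def decode_elias(current,length,byte_info):
--     new_len = 0
--     for i in range(length):
--         if byte_info[current] & 1 == 1:
--             new_len += pow(2, length - 1)
--         length -= 1
--         current += 1
--
--     return current,length,new_len
-- ===== SOURCE B (Python) =====
-- def decode_elias(current, length, byte_info):
--     if length <= 0:
--         return current, length, 0
--     bits = ''.join('1' if byte_info[current + i] & 1 else '0' for i in range(length))
--     return current + length, 0, int(bits, 2)
-- ===== Notes on version B (the rewrite author's own statement) =====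
-- stated objective: idiomatic
-- what changed: Instead of A's single mutating loop that adds an explicit pow(2, length-1) under a branch while decrementing length and incrementing current, B works in two stages: it first renders the low bits of the window as a textual binary string and then delegates the numeric decoding to the standard library's int(bits, 2) parser.
import Mathlib
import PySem

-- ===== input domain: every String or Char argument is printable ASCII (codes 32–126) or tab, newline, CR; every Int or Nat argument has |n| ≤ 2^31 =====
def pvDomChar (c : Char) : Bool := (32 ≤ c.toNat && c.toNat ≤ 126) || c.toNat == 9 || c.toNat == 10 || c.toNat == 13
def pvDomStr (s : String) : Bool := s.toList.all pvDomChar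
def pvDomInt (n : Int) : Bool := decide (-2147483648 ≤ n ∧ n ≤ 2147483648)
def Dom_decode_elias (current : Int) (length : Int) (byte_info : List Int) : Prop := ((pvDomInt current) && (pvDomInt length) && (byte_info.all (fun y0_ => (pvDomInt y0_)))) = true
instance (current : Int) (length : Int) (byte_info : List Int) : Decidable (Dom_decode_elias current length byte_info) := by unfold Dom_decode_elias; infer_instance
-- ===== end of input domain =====

-- B stages the work differently (idiomatic): it first renders the window's low bits as a
-- textual binary string and then delegates the numeric decoding to int(bits, 2), instead of
-- A's mutating loop that adds explicit pow(2, length-1) summands under a branch.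

-- ===== PORT A =====
def decode_elias (current : Int) (length : Int) (byte_info : List Int) : Int × Int × Int :=
  (PySem.List.pyRange 0 length 1).foldl
    (fun (st : Int × Int × Int) _ =>
      let new_len :=
        if PySem.Int.band ((PySem.List.pyGet? byte_info st.1).getD 0) 1 = 1 then
          st.2.2 + 2 ^ (st.2.1 - 1).toNat
        else st.2.2
      (st.1 + 1, st.2.1 - 1, new_len))
    (current, length, 0)

-- ===== PORT B =====
def decode_elias_alt (current : Int) (length : Int) (byte_info : List Int) : Int × Int × Int :=
  if length ≤ 0 then (current, length, 0)
  else
    -- ''.join('1' if … else '0' for i in range(length)), a string represented as its List Char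
    -- (the PySem convention: string facts live on the List Char side)
    let bits : List Char := (PySem.List.pyRange 0 length 1).map
      (fun i => if PySem.Int.band ((PySem.List.pyGet? byte_info (current + i)).getD 0) 1 = 1 then '1' else '0')
    -- hand port of int(bits, 2): exact on the nonempty '0'/'1'-only strings built above
    (current + length, 0, bits.foldl (fun a c => a * 2 + if c = '1' then 1 else 0) 0)

-- ===== PRECONDITION & SPEC =====
-- Pre_ excludes exactly the inputs where Python A raises IndexError: a positive length whose
-- window of accessed indices current..current+length-1 leaves Python's valid index range.
def Pre_decode_elias (current : Int) (length : Int) (byte_info : List Int) : Prop :=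
  length ≤ 0 ∨ (-(byte_info.length : Int) ≤ current ∧ current + length ≤ byte_info.length)
instance (current : Int) (length : Int) (byte_info : List Int) : Decidable (Pre_decode_elias current length byte_info) := by unfold Pre_decode_elias; infer_instance
def pvWitness_decode_elias : Int × Int × List Int := (0, 2, [3, 2])

def Spec_decode_elias (current : Int) (length : Int) (byte_info : List Int) (out : Int × Int × Int) : Prop := out = decode_elias_alt current length byte_info
instance (current : Int) (length : Int) (byte_info : List Int) (out : Int × Int × Int) : Decidable (Spec_decode_elias current length byte_info out) := by unfold Spec_decode_elias; infer_instance

-- ===== CLAIM (what is proved, stated in full; the proofs are below) =====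
def Claim_equal_decode_elias : Prop := ∀ (current : Int) (length : Int) (byte_info : List Int), Dom_decode_elias current length byte_info → Pre_decode_elias current length byte_info → Spec_decode_elias current length byte_info (decode_elias current length byte_info)

-- ===== LEMMAS AND PROOFS =====

-- the low bit of byte_info[j] (as both ports compute it)
def pvBit (byte_info : List Int) (j : Int) : Int :=
  PySem.Int.band ((PySem.List.pyGet? byte_info j).getD 0) 1

-- A's loop body, by name
def pvStepA (byte_info : List Int) (st : Int × Int × Int) : Int × Int × Int :=
  let new_len :=
    if PySem.Int.band ((PySem.List.pyGet? byte_info st.1).getD 0) 1 = 1 then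
      st.2.2 + 2 ^ (st.2.1 - 1).toNat
    else st.2.2
  (st.1 + 1, st.2.1 - 1, new_len)

-- the decoded value, MSB first, head-recursively
def pvHorner (byte_info : List Int) (c : Int) : Nat → Int
  | 0 => 0
  | k + 1 => pvBit byte_info c * 2 ^ k + pvHorner byte_info (c + 1) k

theorem pvBit_cases (byte_info : List Int) (j : Int) :
    pvBit byte_info j = 0 ∨ pvBit byte_info j = 1 := by
  unfold pvBit
  rw [PySem.Int.band_one]
  have h1 := PySem.Int.mod_nonneg ((PySem.List.pyGet? byte_info j).getD 0) (by norm_num : (0:Int) < 2)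
  have h2 := PySem.Int.mod_lt ((PySem.List.pyGet? byte_info j).getD 0) (by norm_num : (0:Int) < 2)
  omega

-- the digit value of the character B renders for the bit at j
theorem pvCharBit (byte_info : List Int) (j : Int) :
    (if (if pvBit byte_info j = 1 then '1' else '0') = '1' then (1 : Int) else 0)
      = pvBit byte_info j := by
  rcases pvBit_cases byte_info j with hb | hb <;> simp [hb]

theorem pvStepA_eq (byte_info : List Int) (c nl : Int) (k : Nat) :
    pvStepA byte_info (c, ((k : Int) + 1), nl)
      = (c + 1, (k : Int), nl + pvBit byte_info c * 2 ^ k) := by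
  rcases pvBit_cases byte_info c with hb | hb <;>
    simp only [pvBit] at hb <;>
    simp [pvStepA, pvBit, hb, show ((k : Int) + 1 - 1) = (k : Int) by ring]

-- characterization of A's fold: over any list of length k, starting at (c, k, nl)
theorem pvFoldA (byte_info : List Int) :
    ∀ (k : Nat) (l : List Int), l.length = k → ∀ (c nl : Int),
    l.foldl (fun st _ => pvStepA byte_info st) (c, (k : Int), nl)
      = (c + k, 0, nl + pvHorner byte_info c k) := by
  intro k
  induction k with
  | zero =>
    intro l hl c nl
    rw [List.length_eq_zero_iff.mp hl]
    simp [pvHorner]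
  | succ k ih =>
    intro l hl c nl
    match l with
    | [] => simp at hl
    | x :: t =>
      simp only [List.length_cons, Nat.add_right_cancel_iff] at hl
      rw [List.foldl_cons,
        show ((k + 1 : Nat) : Int) = ((k : Int) + 1) by push_cast; ring,
        pvStepA_eq, ih t hl (c + 1) (nl + pvBit byte_info c * 2 ^ k)]
      refine Prod.ext (by push_cast; ring) (Prod.ext rfl ?_)
      simp only [pvHorner]
      ring

-- characterization of B's bit-digit fold over a Python range
theorem pvFoldB (byte_info : List Int) :
    ∀ (k : Nat) (a c acc : Int),
    (PySem.List.pyRange a (a + k) 1).foldl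
        (fun acc' i => acc' * 2 + pvBit byte_info (c + i)) acc
      = acc * 2 ^ k + pvHorner byte_info (c + a) k := by
  intro k
  induction k with
  | zero =>
    intro a c acc
    rw [show a + ((0 : Nat) : Int) = a by push_cast; ring,
      PySem.List.pyRange_one_eq_nil le_rfl]
    simp [pvHorner]
  | succ k ih =>
    intro a c acc
    rw [PySem.List.pyRange_one_cons (by push_cast; omega), List.foldl_cons,
      show a + ((k + 1 : Nat) : Int) = (a + 1) + (k : Int) by push_cast; ring,
      ih (a + 1) c (acc * 2 + pvBit byte_info (c + a))]
    simp only [pvHorner]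
    have : c + a + 1 = c + (a + 1) := by ring
    rw [this]
    ring

-- ===== VERDICT (by name: the statement is the Claim_ definition above) =====
theorem decode_elias_spec : Claim_equal_decode_elias := by
  intro current length byte_info _hDom _hPre
  unfold Spec_decode_elias decode_elias decode_elias_alt
  by_cases hL : length ≤ 0
  · rw [PySem.List.pyRange_one_eq_nil hL]
    simp [hL]
  · rw [if_neg hL]
    have hk : ((length.toNat : Nat) : Int) = length := by omega
    have hA := pvFoldA byte_info length.toNat (PySem.List.pyRange 0 length 1)
      (by rw [PySem.List.length_pyRange_one]; omega) current 0
    rw [hk] at hA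
    -- B: the parse of the rendered bit string
    simp only []
    rw [List.foldl_map]
    have hfunB : (fun (a : Int) (i : Int) =>
        a * 2 + if (if PySem.Int.band ((PySem.List.pyGet? byte_info (current + i)).getD 0) 1 = 1
                    then '1' else '0') = '1' then (1 : Int) else 0)
        = fun (a : Int) (i : Int) => a * 2 + pvBit byte_info (current + i) := by
      funext a i
      rw [show PySem.Int.band ((PySem.List.pyGet? byte_info (current + i)).getD 0) 1
            = pvBit byte_info (current + i) from rfl, pvCharBit]
    rw [hfunB]
    have hB := pvFoldB byte_info length.toNat 0 current 0
    rw [show (0 : Int) + ((length.toNat : Nat) : Int) = length by omega] at hB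
    have hfunA : (fun (st : Int × Int × Int) (_ : Int) =>
        (st.1 + 1, st.2.1 - 1,
          if PySem.Int.band ((PySem.List.pyGet? byte_info st.1).getD 0) 1 = 1 then
            st.2.2 + 2 ^ (st.2.1 - 1).toNat
          else st.2.2))
        = fun (st : Int × Int × Int) (_ : Int) => pvStepA byte_info st := rfl
    rw [hfunA, hA, hB]
    simp
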